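-- pv_equiv track=rewrite | github.com/YoussBGD/FSMILES-GENERATOR | FSMILES_representation.py | annotate_with_cycle_size
-- ===== SOURCE A (Python) =====
-- def annotate_with_cycle_size(cleaned_elements, fragment_info):
--     # Initialize a list to hold elements after annotation.
--     annotated_elements = []
--     # Initialize an atom index counter to keep track of atoms within each fragment.
--     atom_index = -1
--     # Start with the assumption that we're working on the first fragment.
--     current_fragment = "Fragment 1"
--
--     # Iterate over each element in the list of cleaned elements extracted from the modified SMILES string.
--     for element in cleaned_elements:
--         # Handle special markers ('start', 'sep', 'end') which don't increment the atom index.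
--         if element in ["'start'", "'sep'", "'end'"]:
--             # Add a '_0' suffix to these special elements for correct annotation.
--             special_annotation = element.rstrip("'") + "_0'"
--             annotated_elements.append(special_annotation)
--             # When encountering a 'sep' marker, it indicates moving to the next fragment.
--             if element == "'sep'":
--                 # Calculate the next fragment number and reset the atom index for the new fragment.
--                 current_fragment_number = int(current_fragment.split()[-1]) + 1
--                 current_fragment = f"Fragment {current_fragment_number}"
--                 atom_index = -1
--         # Handle dummy atom symbols ([*]) and ([*]) which do increment the atom index but don't have cycle sizes.
--         elif element in ["([*])", "[*]"]:
--             atom_index += 1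
--             # Annotate these with "_0" to indicate no cycle size.
--             annotated_elements.append(element + "_0")
--         # For atomic symbols, increment the atom index and retrieve the cycle size from the fragment information.
--         elif element.isalpha() and element not in ["@","H","h"]:
--             atom_index += 1
--             # Generate a unique key for the atom based on its symbol and index.
--             if len(element) < 2:
--                 atom_key = f"{element.upper()}{atom_index}"
--             else:
--                 atom_key = f"{element}{atom_index}"
--             # Retrieve the cycle size information for the atom, defaulting to 0 if not found.
--             cycle_size_info = fragment_info.get(current_fragment, {}).get(atom_key, {"cycle_size": 0})
--             cycle_size = cycle_size_info.get("cycle_size", 0)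
--             # Annotate the element with its cycle size.
--             cycle_annotation = f"_{cycle_size}" if cycle_size > 0 else "_0"
--             annotated_elements.append(element + cycle_annotation)
--         else:
--             # For any other elements (not atomic or special markers), they don't modify the index.
--             annotated_elements.append(element + "_0")
--
--     # Combine the annotated elements into a single string and return it.
--     return ''.join(annotated_elements)
-- ===== SOURCE B (Python) =====
-- def _annotate_chunk(chunk, frag):
--     # Annotate one fragment's elements, with a local atom index starting at -1.
--     out = []
--     atom_index = -1
--     for element in chunk:
--         if element in ("'start'", "'end'"):
--             out.append(element.rstrip("'") + "_0'")
--         elif element in ("([*])", "[*]"):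
--             atom_index += 1
--             out.append(element + "_0")
--         elif element.isalpha() and element not in ("@", "H", "h"):
--             atom_index += 1
--             key = (element.upper() if len(element) < 2 else element) + str(atom_index)
--             cycle_size = frag.get(key, {"cycle_size": 0}).get("cycle_size", 0)
--             out.append(element + ("_%d" % cycle_size if cycle_size > 0 else "_0"))
--         else:
--             out.append(element + "_0")
--     return "".join(out)
--
--
-- def annotate_with_cycle_size(cleaned_elements, fragment_info):
--     # Split the elements into per-fragment chunks at the "'sep'" markers,
--     # annotate each chunk with its fragment's info (fragment number = chunk
--     # position + 1), and rejoin the chunks with the "'sep_0'" annotation.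
--     chunks = []
--     current = []
--     for element in cleaned_elements:
--         if element == "'sep'":
--             chunks.append(current)
--             current = []
--         else:
--             current.append(element)
--     chunks.append(current)
--     parts = []
--     for i, chunk in enumerate(chunks):
--         parts.append(_annotate_chunk(chunk, fragment_info.get("Fragment %d" % (i + 1), {})))
--     return "'sep_0'".join(parts)
-- ===== Notes on version B (the rewrite author's own statement) =====
-- stated objective: alternative
-- what changed: B splits the element list into per-fragment chunks at the 'sep' markers and annotates each chunk independently (fragment number = chunk position + 1, local atom index per chunk), joining the chunk outputs with the 'sep_0' annotation, instead of A's single flat loop that mutates an atom counter and re-parses the fragment number out of a 'Fragment N' string with int(split()[-1]) at every separator.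
import Mathlib
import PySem

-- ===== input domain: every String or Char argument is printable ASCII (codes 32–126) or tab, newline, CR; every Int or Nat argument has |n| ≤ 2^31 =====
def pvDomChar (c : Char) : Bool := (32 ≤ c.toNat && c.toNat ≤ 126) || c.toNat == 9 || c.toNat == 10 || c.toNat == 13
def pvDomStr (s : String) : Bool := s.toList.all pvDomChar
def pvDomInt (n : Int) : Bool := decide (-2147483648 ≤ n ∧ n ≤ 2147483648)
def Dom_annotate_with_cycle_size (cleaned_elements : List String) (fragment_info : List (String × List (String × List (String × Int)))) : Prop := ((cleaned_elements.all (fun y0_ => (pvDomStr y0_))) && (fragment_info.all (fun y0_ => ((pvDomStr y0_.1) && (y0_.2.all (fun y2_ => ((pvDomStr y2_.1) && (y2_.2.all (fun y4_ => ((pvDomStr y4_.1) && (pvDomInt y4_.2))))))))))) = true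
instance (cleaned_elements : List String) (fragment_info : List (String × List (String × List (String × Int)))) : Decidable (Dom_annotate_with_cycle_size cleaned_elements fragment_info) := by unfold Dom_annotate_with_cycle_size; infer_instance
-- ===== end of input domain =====

-- B re-decomposes the annotation: split at the "'sep'" markers into per-fragment chunks,
-- annotate each chunk with its own local atom index, and rejoin with the "'sep_0'" marker
-- (A keeps one flat loop with mutable counters and re-parses the fragment number from a string).


-- ===== PORT A =====

-- s.rstrip("'"): drop the trailing "'" characters (exact: rstrip with an explicit
-- character set removes exactly the trailing characters belonging to that set).
def pyRstripQuote (s : String) : String :=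
  String.ofList ((s.toList.reverse.dropWhile (fun c => c = '\'')).reverse)

-- one iteration of A's loop; state = (annotated_elements, atom_index, current_fragment)
def stepA (fragment_info : List (String × List (String × List (String × Int))))
    (st : List String × Int × String) (element : String) : List String × Int × String :=
  let annotated := st.1
  let atom_index := st.2.1
  let current_fragment := st.2.2
  if element = "'start'" ∨ element = "'sep'" ∨ element = "'end'" then
    let annotated := annotated ++ [pyRstripQuote element ++ "_0'"]
    if element = "'sep'" then
      -- int(current_fragment.split()[-1]) + 1 ; the [-1] index and int() never fail here
      -- (current_fragment is always "Fragment N"), so the .getD defaults are unreachable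
      let current_fragment_number :=
        (PySem.Int.ofStr? ((PySem.List.pyGet? (PySem.Str.split₀ current_fragment) (-1)).getD "")).getD 0 + 1
      (annotated, -1, "Fragment " ++ PySem.Int.toStr current_fragment_number)
    else
      (annotated, atom_index, current_fragment)
  else if element = "([*])" ∨ element = "[*]" then
    (annotated ++ [element ++ "_0"], atom_index + 1, current_fragment)
  else if PySem.Str.strIsalpha element = true ∧ ¬(element = "@" ∨ element = "H" ∨ element = "h") then
    let atom_index := atom_index + 1
    let atom_key :=
      (if PySem.Str.len element < 2 then PySem.Str.upper element else element) ++ PySem.Int.toStr atom_index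
    let cycle_size :=
      (PySem.Dict.mk ((PySem.Dict.mk ((PySem.Dict.mk fragment_info).getD current_fragment [])).getD atom_key
        [("cycle_size", (0 : Int))])).getD "cycle_size" 0
    let cycle_annotation := if cycle_size > 0 then "_" ++ PySem.Int.toStr cycle_size else "_0"
    (annotated ++ [element ++ cycle_annotation], atom_index, current_fragment)
  else
    (annotated ++ [element ++ "_0"], atom_index, current_fragment)

def annotate_with_cycle_size (cleaned_elements : List String) (fragment_info : List (String × List (String × List (String × Int)))) : String :=
  PySem.Str.join "" (cleaned_elements.foldl (stepA fragment_info) ([], -1, "Fragment 1")).1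

-- ===== PORT B =====

-- one iteration of _annotate_chunk's loop; state = (out, atom_index)
def chunkStepB (frag : List (String × List (String × Int)))
    (st : List String × Int) (element : String) : List String × Int :=
  if element = "'start'" ∨ element = "'end'" then
    (st.1 ++ [pyRstripQuote element ++ "_0'"], st.2)
  else if element = "([*])" ∨ element = "[*]" then
    (st.1 ++ [element ++ "_0"], st.2 + 1)
  else if PySem.Str.strIsalpha element = true ∧ ¬(element = "@" ∨ element = "H" ∨ element = "h") then
    let atom_index := st.2 + 1
    let key :=
      (if PySem.Str.len element < 2 then PySem.Str.upper element else element) ++ PySem.Int.toStr atom_index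
    let cycle_size :=
      (PySem.Dict.mk ((PySem.Dict.mk frag).getD key [("cycle_size", (0 : Int))])).getD "cycle_size" 0
    (st.1 ++ [element ++ (if cycle_size > 0 then "_" ++ PySem.Int.toStr cycle_size else "_0")], atom_index)
  else
    (st.1 ++ [element ++ "_0"], st.2)

def annotateChunkB (chunk : List String) (frag : List (String × List (String × Int))) : String :=
  PySem.Str.join "" (chunk.foldl (chunkStepB frag) ([], -1)).1

-- one iteration of B's splitting loop; state = (chunks, current)
def splitStepB (st : List (List String) × List String) (element : String) : List (List String) × List String :=
  if element = "'sep'" then (st.1 ++ [st.2], []) else (st.1, st.2 ++ [element])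

def annotate_with_cycle_size_alt (cleaned_elements : List String) (fragment_info : List (String × List (String × List (String × Int)))) : String :=
  let p := cleaned_elements.foldl splitStepB ([], [])
  let chunks := p.1 ++ [p.2]
  let parts := chunks.zipIdx.map (fun q =>
    annotateChunkB q.1 ((PySem.Dict.mk fragment_info).getD ("Fragment " ++ PySem.Int.toStr ((q.2 : Int) + 1)) []))
  PySem.Str.join "'sep_0'" parts

-- ===== PRECONDITION & SPEC =====
def Spec_annotate_with_cycle_size (cleaned_elements : List String) (fragment_info : List (String × List (String × List (String × Int)))) (out : String) : Prop := out = annotate_with_cycle_size_alt cleaned_elements fragment_info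
instance (cleaned_elements : List String) (fragment_info : List (String × List (String × List (String × Int)))) (out : String) : Decidable (Spec_annotate_with_cycle_size cleaned_elements fragment_info out) := by unfold Spec_annotate_with_cycle_size; infer_instance

-- ===== CLAIM (what is proved, stated in full; the proofs are below) =====
def Claim_equal_annotate_with_cycle_size : Prop := ∀ (cleaned_elements : List String) (fragment_info : List (String × List (String × List (String × Int)))), Dom_annotate_with_cycle_size cleaned_elements fragment_info → Spec_annotate_with_cycle_size cleaned_elements fragment_info (annotate_with_cycle_size cleaned_elements fragment_info)

-- ===== LEMMAS AND PROOFS =====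

/- ## Part 1: int(str(n)) = n for 0 ≤ n (used to discharge A's re-parse of "Fragment N") -/

-- transparent copies of the (private) implementation behind PySem.Int.ofChars?,
-- proved equal to it definitionally (pvOfChars_eq below), so that its equations are usable
def pvGo : List Char → Bool → Nat → Option Nat
  | [], afterDigit, acc => if afterDigit = true then some acc else none
  | c :: rest, afterDigit, acc =>
    if c.isDigit = true then pvGo rest true (acc * 10 + (c.toNat - '0'.toNat))
    else
      if c = '_' ∧ afterDigit = true then
        match rest with
        | d :: _tail => if d.isDigit = true then pvGo rest false acc else none
        | [] => none
      else none

def pvDigitsVal? (x : List Char) : Option Nat :=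
  match x with
  | [] => none
  | cs => pvGo cs false 0

def pvOfChars? (s : List Char) : Option Int :=
  have cs := (List.dropWhile PySem.Int.isIntSpace (List.dropWhile PySem.Int.isIntSpace s).reverse).reverse
  match cs with
  | '-' :: ds => Option.map (fun n => -n) do
      let a ← pvDigitsVal? ds
      pure (↑a : Int)
  | '+' :: ds => Option.map (fun n => n) do
      let a ← pvDigitsVal? ds
      pure (↑a : Int)
  | ds => Option.map (fun n => n) do
      let a ← pvDigitsVal? ds
      pure (↑a : Int)

theorem pvOfChars_eq (s : List Char) : PySem.Int.ofChars? s = pvOfChars? s := by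
  simp only [PySem.Int.ofChars?, pvOfChars?]
  generalize (List.dropWhile PySem.Int.isIntSpace (List.dropWhile PySem.Int.isIntSpace s).reverse).reverse = cs
  split
  all_goals simp only []
  all_goals congr 1
  all_goals congr 1
  all_goals (try rfl)
  all_goals refine congrFun ?_ _
  all_goals funext l
  all_goals cases l with
  | nil => rfl
  | cons c0 r0 =>
    conv => lhs; whnf
    conv => rhs; whnf
    congr 1
    case e_isFalse =>
      funext h
      dsimp only []
      rw [if_neg (by simp), if_neg (by simp)]
    case e_isTrue =>
      funext h
      dsimp only []
      have step : ∀ (f g : List Char → Bool → Nat → Option Nat), f = g →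
          f r0 true (0 * 10 + (c0.toNat - '0'.toNat)) = g r0 true (0 * 10 + (c0.toNat - '0'.toNat)) :=
        fun f g hfg => by rw [hfg]
      refine step _ _ ?_
      funext l b a
      induction l generalizing b a with
      | nil => rfl
      | cons c1 r1 ih =>
        conv => lhs; whnf
        conv => rhs; whnf
        congr 1
        case e_isTrue =>
          funext h1
          dsimp only []
          exact ih true _
        case e_isFalse =>
          funext h1
          dsimp only []
          by_cases hC : c1 = '_' ∧ b = true
          · rw [if_pos hC, if_pos hC]
            cases r1 with
            | nil => rfl
            | cons d t =>
              dsimp only []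
              congr 1
              exact ih false a
          · rw [if_neg hC, if_neg hC]

-- the decimal digits of a natural number, most significant first
def pvDigits (n : Nat) : List Char :=
  if h : n < 10 then [Nat.digitChar n]
  else pvDigits (n / 10) ++ [Nat.digitChar (n % 10)]
  decreasing_by exact Nat.div_lt_self (by omega) (by omega)

theorem toDigitsCore_eq_pvDigits : ∀ (f n : Nat) (ds : List Char), n < f →
    Nat.toDigitsCore 10 f n ds = pvDigits n ++ ds := by
  intro f
  induction f with
  | zero => intro n ds h; omega
  | succ f ih =>
    intro n ds h
    rw [Nat.toDigitsCore]
    by_cases h10 : n / 10 = 0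
    · have hn : n < 10 := by omega
      simp [h10, pvDigits, hn, Nat.mod_eq_of_lt hn]
    · have hlt : n / 10 < f := by
        have := Nat.div_lt_self (n := n) (by omega) (by omega : 1 < 10)
        omega
      have hge : ¬ n < 10 := by
        intro hc; exact h10 (Nat.div_eq_of_lt hc)
      simp only [h10, ite_false, ih _ _ hlt]
      rw [show pvDigits n = pvDigits (n / 10) ++ [(n % 10).digitChar] from by
        rw [pvDigits]; simp [hge]]
      simp

theorem toDigits_eq_pvDigits (n : Nat) : Nat.toDigits 10 n = pvDigits n := by
  have := toDigitsCore_eq_pvDigits (n + 1) n [] (by omega)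
  simpa [Nat.toDigits] using this

theorem digitChar_isDigit {m : Nat} (h : m < 10) : (Nat.digitChar m).isDigit = true := by
  interval_cases m <;> decide

theorem pvDigits_all_digit (n : Nat) : ∀ c ∈ pvDigits n, c.isDigit = true := by
  induction n using Nat.strong_induction_on with
  | _ n ih =>
    rw [pvDigits]
    by_cases h : n < 10
    · simp [h, digitChar_isDigit h]
    · simp only [h, dite_false, List.mem_append, List.mem_singleton]
      rintro c (hc | rfl)
      · exact ih (n / 10) (Nat.div_lt_self (by omega) (by omega)) c hc
      · exact digitChar_isDigit (Nat.mod_lt _ (by omega))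

theorem pvDigits_ne_nil (n : Nat) : pvDigits n ≠ [] := by
  rw [pvDigits]
  by_cases h : n < 10 <;> simp [h]

def pvValFold (a : Nat) (ds : List Char) : Nat :=
  ds.foldl (fun acc c => acc * 10 + (c.toNat - '0'.toNat)) a

theorem pvGo_digits : ∀ (ds : List Char) (a : Nat), (∀ c ∈ ds, c.isDigit = true) →
    pvGo ds true a = some (pvValFold a ds) := by
  intro ds
  induction ds with
  | nil => intro a _; simp [pvGo, pvValFold]
  | cons c rest ih =>
    intro a h
    have hc : c.isDigit = true := h c (by simp)
    simp only [pvGo, hc, if_true]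
    rw [ih _ (fun x hx => h x (List.mem_cons_of_mem _ hx))]
    simp [pvValFold]

theorem digitChar_val48 {m : Nat} (h : m < 10) : (Nat.digitChar m).toNat = 48 + m := by
  interval_cases m <;> decide

theorem pvValFold_pvDigits (n : Nat) : ∀ (a : Nat), pvValFold a (pvDigits n) = a * 10 ^ (pvDigits n).length + n := by
  induction n using Nat.strong_induction_on with
  | _ n ih =>
    intro a
    rw [pvDigits]
    by_cases h : n < 10
    · simp only [h, dite_true, pvValFold, List.foldl_cons, List.foldl_nil]
      rw [digitChar_val48 h]
      simp
    · have hd : n / 10 < n := Nat.div_lt_self (by omega) (by omega)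
      simp only [h, dite_false]
      rw [pvValFold, List.foldl_append]
      rw [show List.foldl (fun acc c => acc * 10 + (c.toNat - '0'.toNat)) a (pvDigits (n / 10))
            = a * 10 ^ (pvDigits (n / 10)).length + n / 10 from ih (n / 10) hd a]
      simp only [List.foldl_cons, List.foldl_nil, List.length_append, List.length_cons,
        List.length_nil]
      rw [digitChar_val48 (Nat.mod_lt _ (by omega))]
      simp only [show '0'.toNat = 48 from rfl]
      have hdm : 10 * (n / 10) + n % 10 = n := Nat.div_add_mod n 10
      rw [pow_succ]
      ring_nf
      omega

theorem digit_not_intSpace {c : Char} (h : c.isDigit = true) : PySem.Int.isIntSpace c = false := by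
  simp only [PySem.Int.isIntSpace, Bool.or_eq_false_iff, decide_eq_false_iff_not]
  refine ⟨⟨⟨⟨⟨?_, ?_⟩, ?_⟩, ?_⟩, ?_⟩, ?_⟩ <;> rintro rfl <;> simp_all
  all_goals revert h; decide

theorem dropWhile_eq_self_of_all_false {p : Char → Bool} : ∀ {l : List Char},
    (∀ c ∈ l, p c = false) → List.dropWhile p l = l := by
  intro l h
  cases l with
  | nil => rfl
  | cons c cs => simp [List.dropWhile_cons, h c (by simp)]

theorem pvOfChars_digits (ds : List Char) (hne : ds ≠ []) (hd : ∀ c ∈ ds, c.isDigit = true) :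
    pvOfChars? ds = some ((pvValFold 0 ds : Nat) : Int) := by
  obtain ⟨c, rest, rfl⟩ := List.exists_cons_of_ne_nil hne
  have hspace : ∀ x ∈ c :: rest, PySem.Int.isIntSpace x = false :=
    fun x hx => digit_not_intSpace (hd x hx)
  have h1 : List.dropWhile PySem.Int.isIntSpace (c :: rest) = c :: rest :=
    dropWhile_eq_self_of_all_false hspace
  have h2 : List.dropWhile PySem.Int.isIntSpace (c :: rest).reverse = (c :: rest).reverse :=
    dropWhile_eq_self_of_all_false (fun x hx => hspace x (by simp at hx; rcases hx with h | h <;> simp [h]))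
  have hc : c.isDigit = true := hd c (by simp)
  have hcm : c ≠ '-' := by rintro rfl; simp at hc
  have hcp : c ≠ '+' := by rintro rfl; simp at hc
  simp only [pvOfChars?, h1, h2, List.reverse_reverse]
  split
  next ds' heq =>
    exact absurd (List.cons_eq_cons.mp heq).1 hcm
  next ds' heq =>
    exact absurd (List.cons_eq_cons.mp heq).1 hcp
  next =>
    have : pvDigitsVal? (c :: rest) = pvGo (c :: rest) false 0 := rfl
    rw [this]
    have : pvGo (c :: rest) false 0 = pvGo rest true (0 * 10 + (c.toNat - '0'.toNat)) := by
      simp [pvGo, hc]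
    rw [this, pvGo_digits rest _ (fun x hx => hd x (by simp [hx]))]
    simp [pvValFold, Option.map, hc]

theorem pv_roundtrip (n : Int) (hn : 0 ≤ n) : PySem.Int.ofStr? (PySem.Int.toStr n) = some n := by
  rw [PySem.Int.ofStr?, PySem.Int.toList_toStr, pvOfChars_eq]
  have htc : PySem.Int.toChars n = pvDigits n.toNat := by
    rw [PySem.Int.toChars, if_neg (by omega), toDigits_eq_pvDigits]
  rw [htc, pvOfChars_digits _ (pvDigits_ne_nil _) (pvDigits_all_digit _)]
  have := pvValFold_pvDigits n.toNat 0
  simp only [zero_mul, zero_add] at this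
  rw [this]
  congr 1
  omega

/- ## Part 2: "Fragment N".split() = ["Fragment", str(N)] -/

def fragS (n : Int) : String := "Fragment " ++ PySem.Int.toStr n

theorem digit_toNat {c : Char} (h : c.isDigit = true) : 48 ≤ c.toNat ∧ c.toNat ≤ 57 := by
  simp [Char.isDigit, Char.le_def] at h
  exact h

theorem digit_not_isspace {c : Char} (h : c.isDigit = true) : PySem.Chars.isspace c = false := by
  have := digit_toNat h
  simp [PySem.Chars.isspace]
  omega

theorem go_step {c : Char} (h : PySem.Chars.isspace c = false) (rest cur : List Char)
    (acc : List (List Char)) :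
    PySem.Chars.split₀.go (c :: rest) cur acc = PySem.Chars.split₀.go rest (c :: cur) acc := by
  rw [PySem.Chars.split₀.go, h]
  simp

theorem split_go_nonspace : ∀ (cs cur : List Char) (acc : List (List Char)),
    (∀ c ∈ cs, PySem.Chars.isspace c = false) →
    PySem.Chars.split₀.go cs cur acc =
      if (cur.reverse ++ cs).isEmpty then acc.reverse else acc.reverse ++ [cur.reverse ++ cs] := by
  intro cs
  induction cs with
  | nil =>
    intro cur acc _
    rw [PySem.Chars.split₀.go]
    by_cases h : cur.isEmpty
    · simp_all [List.isEmpty_iff]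
    · simp_all [List.isEmpty_iff]
  | cons c rest ih =>
    intro cur acc h
    rw [PySem.Chars.split₀.go]
    rw [h c (by simp)]
    simp only [Bool.false_eq_true, if_false]
    rw [ih (c :: cur) acc (fun x hx => h x (List.mem_cons_of_mem _ hx))]
    simp

theorem split_go_space_sep (ds : List Char) (w : List Char) (hw : w ≠ []) (hd : ds ≠ [])
    (hds : ∀ c ∈ ds, PySem.Chars.isspace c = false) :
    PySem.Chars.split₀.go (' ' :: ds) w [] = [w.reverse, ds] := by
  rw [PySem.Chars.split₀.go]
  have : PySem.Chars.isspace ' ' = true := by decide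
  rw [this]
  simp only [if_true, List.isEmpty_iff, hw, if_false]
  rw [split_go_nonspace ds [] [w.reverse] hds]
  simp [List.isEmpty_iff, hd]

theorem split₀_frag (ds : List Char) (hd : ds ≠ [])
    (hds : ∀ c ∈ ds, PySem.Chars.isspace c = false) :
    PySem.Chars.split₀ ("Fragment ".toList ++ ds) = ["Fragment".toList, ds] := by
  simp only [PySem.Chars.split₀]
  rw [show "Fragment ".toList ++ ds
      = 'F' :: 'r' :: 'a' :: 'g' :: 'm' :: 'e' :: 'n' :: 't' :: ' ' :: ds from rfl]
  rw [go_step (by decide), go_step (by decide), go_step (by decide), go_step (by decide),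
    go_step (by decide), go_step (by decide), go_step (by decide), go_step (by decide)]
  rw [split_go_space_sep _ _ (by decide) hd hds]
  simp

theorem str_split₀_frag (n : Int) (hn : 1 ≤ n) :
    PySem.Str.split₀ (fragS n) = ["Fragment", PySem.Int.toStr n] := by
  have htl : (fragS n).toList = "Fragment ".toList ++ (PySem.Int.toStr n).toList := by
    rw [fragS, String.toList_append]
  have hds : (PySem.Int.toStr n).toList = pvDigits n.toNat := by
    rw [PySem.Int.toList_toStr, PySem.Int.toChars, if_neg (by omega), toDigits_eq_pvDigits]
  rw [PySem.Str.split₀, htl, hds]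
  rw [split₀_frag _ (pvDigits_ne_nil _)
    (fun c hc => digit_not_isspace (pvDigits_all_digit _ c hc))]
  simp only [List.map_cons, List.map_nil]
  congr 1
  congr 1
  rw [← hds, String.ofList_toList]

-- A's re-parse of the fragment label: int("Fragment N".split()[-1]) + 1 = N + 1
theorem parse_frag (n : Int) (hn : 1 ≤ n) :
    (PySem.Int.ofStr? ((PySem.List.pyGet? (PySem.Str.split₀ (fragS n)) (-1)).getD "")).getD 0 = n := by
  rw [str_split₀_frag n hn, PySem.List.pyGet?_neg_one]
  simp only [List.getLast?_cons_cons, List.getLast?_singleton, Option.getD_some]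
  rw [pv_roundtrip n (by omega)]
  rfl

/- ## Part 3: both programs equal a common recursive specification -/

def fragD (fi : List (String × List (String × List (String × Int)))) (n : Int) :
    List (String × List (String × Int)) :=
  (PySem.Dict.mk fi).getD (fragS n) []

-- the cycle-size annotation appended to an atomic symbol e at atom index ai in fragment n
def alphaAnnot (fi : List (String × List (String × List (String × Int)))) (n : Int)
    (e : String) (ai : Int) : String :=
  let key := (if PySem.Str.len e < 2 then PySem.Str.upper e else e) ++ PySem.Int.toStr ai
  let cycle_size :=
    (PySem.Dict.mk ((PySem.Dict.mk (fragD fi n)).getD key [("cycle_size", (0 : Int))])).getD "cycle_size" 0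
  if cycle_size > 0 then "_" ++ PySem.Int.toStr cycle_size else "_0"

-- reference annotation list: remaining elements, current atom index, current fragment number
def specL (fi : List (String × List (String × List (String × Int)))) :
    List String → Int → Int → List String
  | [], _, _ => []
  | e :: rest, ai, n =>
    if e = "'start'" ∨ e = "'sep'" ∨ e = "'end'" then
      (pyRstripQuote e ++ "_0'") ::
        (if e = "'sep'" then specL fi rest (-1) (n + 1) else specL fi rest ai n)
    else if e = "([*])" ∨ e = "[*]" then
      (e ++ "_0") :: specL fi rest (ai + 1) n
    else if PySem.Str.strIsalpha e = true ∧ ¬(e = "@" ∨ e = "H" ∨ e = "h") then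
      (e ++ alphaAnnot fi n e (ai + 1)) :: specL fi rest (ai + 1) n
    else
      (e ++ "_0") :: specL fi rest ai n

-- string-join helpers
theorem join0_nil : PySem.Str.join "" [] = "" := rfl

theorem join0_cons (x : String) (xs : List String) :
    PySem.Str.join "" (x :: xs) = x ++ PySem.Str.join "" xs := by
  rw [← String.toList_inj]
  rw [PySem.Str.toList_join, String.toList_append, PySem.Str.toList_join]
  cases xs with
  | nil => simp [PySem.Chars.join, List.intercalate]
  | cons y ys => simp [PySem.Chars.join, List.intercalate, List.intersperse_cons₂]

theorem joinSep_singleton (s x : String) : PySem.Str.join s [x] = x := by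
  rw [← String.toList_inj, PySem.Str.toList_join]
  simp [PySem.Chars.join, List.intercalate]

theorem joinSep_cons (s x y : String) (xs : List String) :
    PySem.Str.join s (x :: y :: xs) = x ++ s ++ PySem.Str.join s (y :: xs) := by
  rw [← String.toList_inj]
  rw [PySem.Str.toList_join, String.toList_append, String.toList_append, PySem.Str.toList_join]
  simp [PySem.Chars.join, List.intercalate]

-- A's loop equals the reference list
theorem foldA_spec (fi : List (String × List (String × List (String × Int)))) :
    ∀ (es : List String) (acc : List String) (ai n : Int), 1 ≤ n →
    (es.foldl (stepA fi) (acc, ai, fragS n)).1 = acc ++ specL fi es ai n := by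
  intro es
  induction es with
  | nil => intro acc ai n hn; simp [specL]
  | cons e rest ih =>
    intro acc ai n hn
    rw [List.foldl_cons, specL]
    by_cases h1 : e = "'start'" ∨ e = "'sep'" ∨ e = "'end'"
    · by_cases h2 : e = "'sep'"
      · have hstep : stepA fi (acc, ai, fragS n) e
            = (acc ++ [pyRstripQuote e ++ "_0'"], -1, fragS (n + 1)) := by
          simp only [stepA, if_pos h1, if_pos h2]
          rw [parse_frag n hn]
          rfl
        rw [hstep, ih _ _ _ (by omega), if_pos h1, if_pos h2]
        simp
      · have hstep : stepA fi (acc, ai, fragS n) e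
            = (acc ++ [pyRstripQuote e ++ "_0'"], ai, fragS n) := by
          simp only [stepA, if_pos h1, if_neg h2]
        rw [hstep, ih _ _ _ hn, if_pos h1, if_neg h2]
        simp
    · by_cases h3 : e = "([*])" ∨ e = "[*]"
      · have hstep : stepA fi (acc, ai, fragS n) e = (acc ++ [e ++ "_0"], ai + 1, fragS n) := by
          simp only [stepA, if_neg h1, if_pos h3]
        rw [hstep, ih _ _ _ hn, if_neg h1, if_pos h3]
        simp
      · by_cases h4 : PySem.Str.strIsalpha e = true ∧ ¬(e = "@" ∨ e = "H" ∨ e = "h")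
        · have hstep : stepA fi (acc, ai, fragS n) e
              = (acc ++ [e ++ alphaAnnot fi n e (ai + 1)], ai + 1, fragS n) := by
            simp only [stepA, if_neg h1, if_neg h3, if_pos h4]
            rfl
          rw [hstep, ih _ _ _ hn, if_neg h1, if_neg h3, if_pos h4]
          simp
        · have hstep : stepA fi (acc, ai, fragS n) e = (acc ++ [e ++ "_0"], ai, fragS n) := by
            simp only [stepA, if_neg h1, if_neg h3, if_neg h4]
          rw [hstep, ih _ _ _ hn, if_neg h1, if_neg h3, if_neg h4]
          simp

-- B's splitting loop equals the recursive chunk decomposition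
def chunksRec : List String → List String → List (List String)
  | [], cur => [cur]
  | e :: r, cur => if e = "'sep'" then cur :: chunksRec r [] else chunksRec r (cur ++ [e])

theorem chunksRec_ne_nil : ∀ (es cur : List String), chunksRec es cur ≠ [] := by
  intro es
  induction es with
  | nil => intro cur; simp [chunksRec]
  | cons e r ih =>
    intro cur
    rw [chunksRec]
    by_cases h : e = "'sep'"
    · simp [h]
    · simp only [h, if_false]
      exact ih _

theorem splitFold (es : List String) : ∀ (cA : List (List String)) (cur : List String),
    (es.foldl splitStepB (cA, cur)).1 ++ [(es.foldl splitStepB (cA, cur)).2]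
      = cA ++ chunksRec es cur := by
  induction es with
  | nil => intro cA cur; simp [chunksRec]
  | cons e r ih =>
    intro cA cur
    rw [List.foldl_cons, chunksRec]
    by_cases h : e = "'sep'"
    · have hs : splitStepB (cA, cur) e = (cA ++ [cur], []) := by simp [splitStepB, h]
      rw [hs, if_pos h, ih]
      simp
    · have hs : splitStepB (cA, cur) e = (cA, cur ++ [e]) := by simp [splitStepB, h]
      rw [hs, if_neg h, ih]

-- B's remaining-output semantics: remaining elements, current chunk state, fragment number
def bRec (fi : List (String × List (String × List (String × Int)))) :
    List String → (List String × Int) → Int → String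
  | [], st, _ => PySem.Str.join "" st.1
  | e :: r, st, n =>
    if e = "'sep'" then
      PySem.Str.join "" st.1 ++ "'sep_0'" ++ bRec fi r ([], -1) (n + 1)
    else
      bRec fi r (chunkStepB (fragD fi n) st e) n

theorem chunks_to_bRec (fi : List (String × List (String × List (String × Int)))) :
    ∀ (es cur : List String) (k : Nat),
    PySem.Str.join "'sep_0'" (((chunksRec es cur).zipIdx k).map
        (fun q => annotateChunkB q.1 (fragD fi ((q.2 : Int) + 1))))
      = bRec fi es (cur.foldl (chunkStepB (fragD fi ((k : Int) + 1))) ([], -1)) ((k : Int) + 1) := by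
  intro es
  induction es with
  | nil =>
    intro cur k
    simp only [chunksRec, List.zipIdx_cons, List.zipIdx_nil, List.map_cons, List.map_nil, bRec]
    rw [joinSep_singleton]
    rfl
  | cons e r ih =>
    intro cur k
    rw [chunksRec]
    by_cases h : e = "'sep'"
    · rw [if_pos h]
      obtain ⟨c, t, hct⟩ := List.exists_cons_of_ne_nil (chunksRec_ne_nil r [])
      have ih' := ih [] (k + 1)
      rw [hct] at ih' ⊢
      simp only [List.foldl_nil] at ih'
      simp only [List.zipIdx_cons, List.map_cons] at ih' ⊢
      rw [joinSep_cons, ih']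
      simp only [bRec, h, if_pos rfl]
      have hc : ((k : Int) + 1) + 1 = ((k + 1 : Nat) : Int) + 1 := by push_cast; ring
      rw [hc]
      rfl
    · rw [if_neg h, ih (cur ++ [e]) k]
      simp only [bRec, h, if_false, List.foldl_append, List.foldl_cons, List.foldl_nil]

theorem join0_append_singleton (l : List String) (x : String) :
    PySem.Str.join "" (l ++ [x]) = PySem.Str.join "" l ++ x := by
  induction l with
  | nil =>
    rw [List.nil_append, join0_cons, join0_nil]
    simp
  | cons a t ih => rw [List.cons_append, join0_cons, ih, join0_cons, String.append_assoc]

theorem bRec_spec (fi : List (String × List (String × List (String × Int)))) :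
    ∀ (es : List String) (st : List String × Int) (n : Int),
    bRec fi es st n = PySem.Str.join "" st.1 ++ PySem.Str.join "" (specL fi es st.2 n) := by
  intro es
  induction es with
  | nil => intro st n; simp [bRec, specL, join0_nil]
  | cons e r ih =>
    intro st n
    rw [specL]
    by_cases h2 : e = "'sep'"
    · have h1 : e = "'start'" ∨ e = "'sep'" ∨ e = "'end'" := Or.inr (Or.inl h2)
      rw [if_pos h1, if_pos h2, join0_cons]
      have hb : bRec fi (e :: r) st n
          = PySem.Str.join "" st.1 ++ "'sep_0'" ++ bRec fi r ([], -1) (n + 1) := by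
        simp only [bRec, h2]
        simp
      rw [hb, ih]
      rw [show pyRstripQuote e ++ "_0'" = "'sep_0'" from by rw [h2]; decide]
      simp [join0_nil, String.append_assoc]
    · have hb : bRec fi (e :: r) st n = bRec fi r (chunkStepB (fragD fi n) st e) n := by
        simp only [bRec, h2, if_false]
      rw [hb, ih]
      by_cases h1 : e = "'start'" ∨ e = "'sep'" ∨ e = "'end'"
      · have h1' : e = "'start'" ∨ e = "'end'" := by
          rcases h1 with h | h | h
          · exact Or.inl h
          · exact absurd h h2
          · exact Or.inr h
        have hcs : chunkStepB (fragD fi n) st e = (st.1 ++ [pyRstripQuote e ++ "_0'"], st.2) := by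
          simp only [chunkStepB, if_pos h1']
        rw [hcs, if_pos h1, if_neg h2]
        simp only []
        rw [join0_append_singleton, join0_cons, String.append_assoc]
      · have h1' : ¬ (e = "'start'" ∨ e = "'end'") := by
          intro hc; rcases hc with h | h
          · exact h1 (Or.inl h)
          · exact h1 (Or.inr (Or.inr h))
        rw [if_neg h1]
        by_cases h3 : e = "([*])" ∨ e = "[*]"
        · have hcs : chunkStepB (fragD fi n) st e = (st.1 ++ [e ++ "_0"], st.2 + 1) := by
            simp only [chunkStepB, if_neg h1', if_pos h3]
          rw [hcs, if_pos h3]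
          simp only []
          rw [join0_append_singleton, join0_cons, String.append_assoc]
        · by_cases h4 : PySem.Str.strIsalpha e = true ∧ ¬(e = "@" ∨ e = "H" ∨ e = "h")
          · have hcs : chunkStepB (fragD fi n) st e
                = (st.1 ++ [e ++ alphaAnnot fi n e (st.2 + 1)], st.2 + 1) := by
              simp only [chunkStepB, if_neg h1', if_neg h3, if_pos h4]
              rfl
            rw [hcs, if_neg h3, if_pos h4]
            simp only []
            rw [join0_append_singleton, join0_cons, String.append_assoc]
          · have hcs : chunkStepB (fragD fi n) st e = (st.1 ++ [e ++ "_0"], st.2) := by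
              simp only [chunkStepB, if_neg h1', if_neg h3, if_neg h4]
            rw [hcs, if_neg h3, if_neg h4]
            simp only []
            rw [join0_append_singleton, join0_cons, String.append_assoc]

theorem a_eq_spec (ce : List String) (fi : List (String × List (String × List (String × Int)))) :
    annotate_with_cycle_size ce fi = PySem.Str.join "" (specL fi ce (-1) 1) := by
  rw [annotate_with_cycle_size]
  rw [show ("Fragment 1" : String) = fragS 1 from by decide]
  rw [foldA_spec fi ce [] (-1) 1 (by omega)]
  simp

theorem b_eq_spec (ce : List String) (fi : List (String × List (String × List (String × Int)))) :
    annotate_with_cycle_size_alt ce fi = PySem.Str.join "" (specL fi ce (-1) 1) := by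
  rw [annotate_with_cycle_size_alt]
  have hch : (ce.foldl splitStepB ([], [])).1 ++ [(ce.foldl splitStepB ([], [])).2]
      = chunksRec ce [] := by
    rw [splitFold]
    simp
  rw [hch]
  have := chunks_to_bRec fi ce [] 0
  simp only [List.foldl_nil, Nat.cast_zero, zero_add] at this
  rw [show (fun q : List String × Nat =>
      annotateChunkB q.1 ((PySem.Dict.mk fi).getD ("Fragment " ++ PySem.Int.toStr ((q.2 : Int) + 1)) []))
    = (fun q : List String × Nat => annotateChunkB q.1 (fragD fi ((q.2 : Int) + 1))) from rfl]
  rw [this, bRec_spec]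
  simp [join0_nil]

-- ===== VERDICT (by name: the statement is the Claim_ definition above) =====

theorem annotate_with_cycle_size_spec : Claim_equal_annotate_with_cycle_size := by
  intro ce fi _
  unfold Spec_annotate_with_cycle_size
  rw [a_eq_spec, b_eq_spec]
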